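-- pv_equiv track=rewrite | github.com/spyrospav/pl1-ntua | ztalloc/ztalloc.py | solve
-- ===== SOURCE A (Python) =====
-- import queue
--
-- def solve(Lin, Rin, Lout, Rout):
-- 	seen_set = {(Lin, Rin)}
-- 	q = queue.Queue()
-- 	q.put((Lin,Rin,'i'))
-- 	seen_states = 0
-- 	if Lin >= Lout and Rin <= Rout:
-- 		return "EMPTY"
--
-- 	while(not q.empty()):
-- 		seen_states = seen_states + 1
--
-- 		if seen_states > 1000000:
-- 			break
--
-- 		(a, b, c) = q.get()
-- 		a2, b2 = a//2, b//2
-- 		a3, b3 = 3*a+1, 3*b+1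
--
-- 		if (a2, b2) not in seen_set:
-- 			seen_set.add((a2,b2))
-- 			s = c + 'h'
-- 			q.put((a2,b2,s))
-- 			if a2 >= Lout and b2 <= Rout:
-- 				return s[1:]
--
-- 		if (a3, b3) not in seen_set and b3 < 1000000:
-- 			seen_set.add((a3,b3))
-- 			s = c + 't'
-- 			q.put((a3,b3,s))
-- 			if a3 >= Lout and b3 <= Rout:
-- 				return s[1:]
--
-- 	return "IMPOSSIBLE"
-- ===== SOURCE B (Python) =====
-- from collections import deque
--
--
-- def _candidates(a, b):
--     # children of state (a, b) in the order A tries them: halving, then 3x+1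
--     out = [((a // 2, b // 2), 'h')]
--     b3 = 3 * b + 1
--     if b3 < 1000000:
--         out.append(((3 * a + 1, b3), 't'))
--     return out
--
--
-- def _build(prev, state):
--     # walk parent links back to the start (whose entry is None), then reverse
--     ops = []
--     while prev[state] is not None:
--         parent, op = prev[state]
--         ops.append(op)
--         state = parent
--     return ''.join(reversed(ops))
--
--
-- def solve(Lin, Rin, Lout, Rout):
--     if Lin >= Lout and Rin <= Rout:
--         return "EMPTY"
--     start = (Lin, Rin)
--     # prev doubles as the seen set: state -> (parent_state, op), start -> None
--     prev = {start: None}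
--     q = deque([start])
--     dequeues = 0
--     while q:
--         dequeues += 1
--         if dequeues > 1000000:
--             break
--         a, b = q.popleft()
--         for child, op in _candidates(a, b):
--             if child not in prev:
--                 prev[child] = ((a, b), op)
--                 q.append(child)
--                 if child[0] >= Lout and child[1] <= Rout:
--                     return _build(prev, child)
--     return "IMPOSSIBLE"
-- ===== Notes on version B (the rewrite author's own statement) =====
-- stated objective: alternative
-- what changed: B enqueues bare (a,b) states, generates children through a candidate-list helper iterated by a small for-loop, and stores parents in one dict that doubles as the seen set (state -> (parent, op), start -> None), reconstructing the op string by walking parent links only when the goal is found, instead of A's queue.Queue entries that each carry a freshly concatenated path string and a separate seen set.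
import Mathlib
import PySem

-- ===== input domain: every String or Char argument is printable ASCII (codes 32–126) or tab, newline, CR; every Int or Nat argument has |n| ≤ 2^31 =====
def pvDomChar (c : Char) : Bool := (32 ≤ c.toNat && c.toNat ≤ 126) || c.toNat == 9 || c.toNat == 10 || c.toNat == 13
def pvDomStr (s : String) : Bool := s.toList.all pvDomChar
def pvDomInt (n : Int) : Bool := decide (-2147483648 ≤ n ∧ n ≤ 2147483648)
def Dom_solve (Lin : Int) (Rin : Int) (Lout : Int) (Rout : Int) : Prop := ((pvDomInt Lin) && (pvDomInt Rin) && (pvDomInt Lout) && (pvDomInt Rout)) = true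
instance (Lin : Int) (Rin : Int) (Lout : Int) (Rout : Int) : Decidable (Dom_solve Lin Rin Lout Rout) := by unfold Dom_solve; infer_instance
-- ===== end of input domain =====

-- B replaces A's queue of (state, path-string) pairs by a queue of bare states plus one
-- parent dict that doubles as the seen set; children come from a candidate-list helper
-- and the op string is rebuilt from parent links only at the goal (objective: alternative
-- decomposition, no per-enqueue string copy).

-- ===== PORT A =====
-- the BFS while-loop of A; fuel = remaining allowed dequeues (A caps at 1000000),
-- path strings carried as List Char ('i' marker included, as in A)
def solveLoopA (Lout Rout : Int) : Nat → List (Int × Int × List Char) → PySem.Set (Int × Int) → String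
  | 0, _, _ => "IMPOSSIBLE"
  | _ + 1, [], _ => "IMPOSSIBLE"
  | fuel + 1, (a, b, c) :: rest, seen =>
    let a2 := PySem.Int.floordiv a 2
    let b2 := PySem.Int.floordiv b 2
    let a3 := 3 * a + 1
    let b3 := 3 * b + 1
    if PySem.Set.contains seen (a2, b2) = false then
      let seen1 := PySem.Set.add seen (a2, b2)
      let s := c ++ ['h']
      let q1 := rest ++ [(a2, b2, s)]
      if a2 ≥ Lout ∧ b2 ≤ Rout then String.ofList (PySem.List.slice s (some 1) none)
      else
        if PySem.Set.contains seen1 (a3, b3) = false ∧ b3 < 1000000 then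
          let seen2 := PySem.Set.add seen1 (a3, b3)
          let s2 := c ++ ['t']
          let q2 := q1 ++ [(a3, b3, s2)]
          if a3 ≥ Lout ∧ b3 ≤ Rout then String.ofList (PySem.List.slice s2 (some 1) none)
          else solveLoopA Lout Rout fuel q2 seen2
        else solveLoopA Lout Rout fuel q1 seen1
    else
      if PySem.Set.contains seen (a3, b3) = false ∧ b3 < 1000000 then
        let seen2 := PySem.Set.add seen (a3, b3)
        let s2 := c ++ ['t']
        let q2 := rest ++ [(a3, b3, s2)]
        if a3 ≥ Lout ∧ b3 ≤ Rout then String.ofList (PySem.List.slice s2 (some 1) none)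
        else solveLoopA Lout Rout fuel q2 seen2
      else solveLoopA Lout Rout fuel rest seen

def solve (Lin : Int) (Rin : Int) (Lout : Int) (Rout : Int) : String :=
  if Lin ≥ Lout ∧ Rin ≤ Rout then "EMPTY"
  else solveLoopA Lout Rout 1000000 [(Lin, Rin, ['i'])] (PySem.Set.ofList [(Lin, Rin)])

-- ===== PORT B =====
-- _candidates: the children of (a, b) in A's trial order, the 3x+1 child only below 1000000
def candidatesB (a b : Int) : List ((Int × Int) × Char) :=
  let out := [((PySem.Int.floordiv a 2, PySem.Int.floordiv b 2), 'h')]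
  let b3 := 3 * b + 1
  if b3 < 1000000 then out ++ [((3 * a + 1, b3), 't')] else out

-- _build: follow parent links until the start entry (mapped to none); fuel = dict size
def buildB (prev : PySem.Dict (Int × Int) (Option ((Int × Int) × Char))) :
    Nat → (Int × Int) → List Char → String
  | 0, _, ops => String.ofList ops.reverse
  | f + 1, st, ops =>
    match prev.get? st with
    | some (some (p, op)) => buildB prev f p (ops ++ [op])
    | _ => String.ofList ops.reverse

-- the for-loop over _candidates: either a returned string or the updated (prev, queue)
def stepB (Lout Rout a b : Int) :
    List ((Int × Int) × Char) → PySem.Dict (Int × Int) (Option ((Int × Int) × Char)) → List (Int × Int) →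
      String ⊕ (PySem.Dict (Int × Int) (Option ((Int × Int) × Char)) × List (Int × Int))
  | [], prev, q => Sum.inr (prev, q)
  | (child, op) :: rest, prev, q =>
    if prev.contains child then stepB Lout Rout a b rest prev q
    else
      let prev' := prev.insert child (some ((a, b), op))
      let q' := q ++ [child]
      if child.1 ≥ Lout ∧ child.2 ≤ Rout then Sum.inl (buildB prev' prev'.size child [])
      else stepB Lout Rout a b rest prev' q'

def solveLoopB (Lout Rout : Int) :
    Nat → List (Int × Int) → PySem.Dict (Int × Int) (Option ((Int × Int) × Char)) → String
  | 0, _, _ => "IMPOSSIBLE"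
  | _ + 1, [], _ => "IMPOSSIBLE"
  | fuel + 1, (a, b) :: rest, prev =>
    match stepB Lout Rout a b (candidatesB a b) prev rest with
    | Sum.inl s => s
    | Sum.inr (prev', q') => solveLoopB Lout Rout fuel q' prev'

def solve_alt (Lin : Int) (Rin : Int) (Lout : Int) (Rout : Int) : String :=
  if Lin ≥ Lout ∧ Rin ≤ Rout then "EMPTY"
  else solveLoopB Lout Rout 1000000 [(Lin, Rin)] (PySem.Dict.empty.insert (Lin, Rin) none)

-- ===== PRECONDITION & SPEC =====
def Spec_solve (Lin : Int) (Rin : Int) (Lout : Int) (Rout : Int) (out : String) : Prop := out = solve_alt Lin Rin Lout Rout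
instance (Lin : Int) (Rin : Int) (Lout : Int) (Rout : Int) (out : String) : Decidable (Spec_solve Lin Rin Lout Rout out) := by unfold Spec_solve; infer_instance

-- ===== CLAIM (what is proved, stated in full; the proofs are below) =====
def Claim_equal_solve : Prop := ∀ (Lin : Int) (Rin : Int) (Lout : Int) (Rout : Int), Dom_solve Lin Rin Lout Rout → Spec_solve Lin Rin Lout Rout (solve Lin Rin Lout Rout)

-- ===== LEMMAS AND PROOFS =====

theorem set_contains_add (s : PySem.Set (Int × Int)) (x y : Int × Int) :
    PySem.Set.contains (PySem.Set.add s x) y = (y == x || PySem.Set.contains s y) := by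
  have hbe : (y == x) = decide (y = x) := by by_cases hyx : y = x <;> simp [hyx]
  by_cases h : PySem.Set.contains s x
  · simp only [PySem.Set.add, h, if_true]
    by_cases hyx : y = x
    · subst hyx; simp [(PySem.Set.contains_iff _ _).mp h]
    · simp [hyx]
  · simp only [PySem.Set.add, h, if_false, Bool.false_eq_true]
    simp [PySem.Set.contains, Bool.or_comm, hbe]

-- the seen set of A and the key set of B's parent dict stay in lockstep
theorem sync_step {seen : PySem.Set (Int × Int)}
    {prev : PySem.Dict (Int × Int) (Option ((Int × Int) × Char))}
    (h : ∀ y, PySem.Set.contains seen y = prev.contains y)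
    (k : Int × Int) (v : Option ((Int × Int) × Char)) :
    ∀ y, PySem.Set.contains (PySem.Set.add seen k) y = (prev.insert k v).contains y := by
  intro y
  rw [set_contains_add, PySem.Dict.contains_insert, h]

-- a parent-link chain from `start` down to `st` in prev; l = op chars, most recent first
inductive PChain (prev : PySem.Dict (Int × Int) (Option ((Int × Int) × Char))) (start : Int × Int) :
    (Int × Int) → List Char → Prop
  | nil : PChain prev start start []
  | cons {st pa : Int × Int} {op : Char} {l : List Char} :
      prev.get? st = some (some (pa, op)) → PChain prev start pa l →
      PChain prev start st (op :: l)

theorem buildB_of_chain {prev : PySem.Dict (Int × Int) (Option ((Int × Int) × Char))}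
    {start st : Int × Int} {l : List Char}
    (hstart : prev.get? start = some none)
    (h : PChain prev start st l) :
    ∀ fuel : Nat, l.length ≤ fuel → ∀ acc : List Char,
      buildB prev fuel st acc = String.ofList (acc ++ l).reverse := by
  induction h with
  | nil =>
    intro fuel _ acc
    cases fuel with
    | zero => simp [buildB]
    | succ f => simp [buildB, hstart]
  | @cons st pa op l hget _ ih =>
    intro fuel hf acc
    cases fuel with
    | zero => simp at hf
    | succ f =>
      have hf' : l.length ≤ f := by simpa using hf
      simp only [buildB, hget]
      rw [ih f hf' (acc ++ [op])]
      simp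

theorem chain_insert {prev : PySem.Dict (Int × Int) (Option ((Int × Int) × Char))}
    {start st : Int × Int} {l : List Char} (h : PChain prev start st l)
    {k : Int × Int} {v : Option ((Int × Int) × Char)} (hk : prev.contains k = false) :
    PChain (prev.insert k v) start st l := by
  induction h with
  | nil => exact .nil
  | @cons st pa op l hget _ ih =>
    have hkne : st ≠ k := by
      intro he
      subst he
      rw [PySem.Dict.contains_eq_isSome_get?, hget] at hk
      cases hk
    exact .cons (by rw [PySem.Dict.get?_insert_of_ne _ _ hkne]; exact hget) ih

theorem start_insert {prev : PySem.Dict (Int × Int) (Option ((Int × Int) × Char))}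
    {start k : Int × Int} (v : Option ((Int × Int) × Char))
    (hstart : prev.get? start = some none) (hk : prev.contains k = false) :
    (prev.insert k v).get? start = some none := by
  have hne : start ≠ k := by
    intro he
    subst he
    rw [PySem.Dict.contains_eq_isSome_get?, hstart] at hk
    cases hk
  rw [PySem.Dict.get?_insert_of_ne _ _ hne]; exact hstart

-- what A carries in its queue entry, expressed through B's parent dict
def EntryInv (prev : PySem.Dict (Int × Int) (Option ((Int × Int) × Char)))
    (start : Int × Int) (e : Int × Int × List Char) : Prop :=
  ∃ l, PChain prev start (e.1, e.2.1) l ∧ e.2.2 = 'i' :: l.reverse ∧ l.length + 1 ≤ prev.size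

theorem size_insert_fresh {prev : PySem.Dict (Int × Int) (Option ((Int × Int) × Char))}
    {k : Int × Int} (v : Option ((Int × Int) × Char)) (hk : prev.contains k = false) :
    (prev.insert k v).size = prev.size + 1 := by
  simp [PySem.Dict.size_insert, hk]

theorem entryInv_insert {prev : PySem.Dict (Int × Int) (Option ((Int × Int) × Char))}
    {start : Int × Int} {e : Int × Int × List Char} {k : Int × Int}
    (v : Option ((Int × Int) × Char)) (hk : prev.contains k = false)
    (h : EntryInv prev start e) : EntryInv (prev.insert k v) start e := by
  obtain ⟨l, hc, hs, hl⟩ := h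
  exact ⟨l, chain_insert hc hk, hs, by rw [size_insert_fresh v hk]; omega⟩

-- the freshly enqueued child's invariant
theorem entryInv_child {prev : PySem.Dict (Int × Int) (Option ((Int × Int) × Char))}
    {start : Int × Int} {a b : Int} {c l : List Char} {op : Char} {x : Int × Int}
    (hc : PChain prev start (a, b) l) (hs : c = 'i' :: l.reverse) (hl : l.length + 1 ≤ prev.size)
    (hfresh : prev.contains x = false) :
    EntryInv (prev.insert x (some ((a, b), op))) start (x.1, x.2, c ++ [op]) := by
  refine ⟨op :: l, ?_, by simp [hs], by rw [size_insert_fresh _ hfresh]; simpa using hl⟩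
  have : PChain (prev.insert x (some ((a, b), op))) start x (op :: l) :=
    .cons (by simp [PySem.Dict.get?_insert_self]) (chain_insert hc hfresh)
  simpa using this

-- A's sliced path string equals B's reconstruction at the freshly inserted goal child
theorem return_case {prev : PySem.Dict (Int × Int) (Option ((Int × Int) × Char))}
    {start x : Int × Int} {a b : Int} {c l : List Char} {op : Char}
    (hstart : prev.get? start = some none)
    (hc : PChain prev start (a, b) l) (hs : c = 'i' :: l.reverse) (hl : l.length + 1 ≤ prev.size)
    (hfresh : prev.contains x = false) :
    String.ofList (PySem.List.slice (c ++ [op]) (some 1) none) =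
      buildB (prev.insert x (some ((a, b), op))) (prev.insert x (some ((a, b), op))).size x [] := by
  have hchain : PChain (prev.insert x (some ((a, b), op))) start x (op :: l) := by
    have : PChain (prev.insert x (some ((a, b), op))) start x (op :: l) :=
      .cons (by simp [PySem.Dict.get?_insert_self]) (chain_insert hc hfresh)
    exact this
  rw [buildB_of_chain (start_insert _ hstart hfresh) hchain _
    (by rw [size_insert_fresh _ hfresh]; simp; omega) []]
  rw [PySem.List.slice_from_one, hs]
  simp

theorem loop_eq (Lout Rout : Int) (start : Int × Int) :
    ∀ (fuel : Nat) (qA : List (Int × Int × List Char)) (seen : PySem.Set (Int × Int))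
      (prev : PySem.Dict (Int × Int) (Option ((Int × Int) × Char))),
      (∀ y, PySem.Set.contains seen y = prev.contains y) →
      prev.get? start = some none →
      (∀ e ∈ qA, EntryInv prev start e) →
      solveLoopA Lout Rout fuel qA seen =
        solveLoopB Lout Rout fuel (qA.map (fun e => (e.1, e.2.1))) prev := by
  intro fuel
  induction fuel with
  | zero => intro qA seen prev _ _ _; cases qA <;> rfl
  | succ f ih =>
    intro qA seen prev hsync hstart hq
    match qA with
    | [] => rfl
    | (a, b, c) :: rest =>
      obtain ⟨l, hc, hs, hl⟩ := hq _ (List.mem_cons_self)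
      simp only at hc hs hl
      have hrest : ∀ e ∈ rest, EntryInv prev start e := fun e he => hq e (List.mem_cons_of_mem _ he)
      simp only [List.map_cons, solveLoopA, solveLoopB, candidatesB]
      set a2 := PySem.Int.floordiv a 2 with ha2
      set b2 := PySem.Int.floordiv b 2 with hb2
      have hsync1 : ∀ v y, PySem.Set.contains (PySem.Set.add seen (a2, b2)) y
          = (prev.insert (a2, b2) v).contains y := fun v => sync_step hsync _ v
      by_cases hb3 : 3 * b + 1 < 1000000
      · rw [if_pos hb3]
        simp only [List.cons_append, List.nil_append, stepB]
        simp only [← hsync, ← hsync1]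
        by_cases hh : PySem.Set.contains seen (a2, b2) = false
        · have hph : prev.contains (a2, b2) = false := by rw [← hsync]; exact hh
          rw [if_pos hh, if_neg (show ¬ PySem.Set.contains seen (a2, b2) = true from ne_true_of_eq_false hh)]
          by_cases hg : a2 ≥ Lout ∧ b2 ≤ Rout
          · rw [if_pos hg, if_pos hg]
            simpa using return_case hstart hc hs hl hph
          · rw [if_neg hg, if_neg hg]
            have hstart1 := start_insert (some ((a, b), 'h')) hstart hph
            have hc1 := chain_insert hc (v := some ((a, b), 'h')) hph
            have hl1 : l.length + 1 ≤ (prev.insert (a2, b2) (some ((a, b), 'h'))).size := by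
              rw [size_insert_fresh _ hph]; omega
            by_cases ht : PySem.Set.contains (PySem.Set.add seen (a2, b2)) (3 * a + 1, 3 * b + 1) = false
            · have hpt1 : (prev.insert (a2, b2) (some ((a, b), 'h'))).contains (3 * a + 1, 3 * b + 1) = false := by
                rw [← hsync1]; exact ht
              rw [if_pos ⟨ht, hb3⟩, if_neg (show ¬ PySem.Set.contains (PySem.Set.add seen (a2, b2)) (3 * a + 1, 3 * b + 1) = true from ne_true_of_eq_false ht)]
              by_cases hg2 : 3 * a + 1 ≥ Lout ∧ 3 * b + 1 ≤ Rout
              · rw [if_pos hg2, if_pos hg2]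
                simpa using return_case hstart1 hc1 hs hl1 hpt1
              · rw [if_neg hg2, if_neg hg2]
                have hmain := ih ((rest ++ [(a2, b2, c ++ ['h'])]) ++ [(3 * a + 1, 3 * b + 1, c ++ ['t'])])
                  ((PySem.Set.add seen (a2, b2)).add (3 * a + 1, 3 * b + 1))
                  (((prev.insert (a2, b2) (some ((a, b), 'h'))).insert (3 * a + 1, 3 * b + 1) (some ((a, b), 't'))))
                  (sync_step (hsync1 _) _ _) (start_insert _ hstart1 hpt1) ?_
                · simpa using hmain
                · intro e he
                  simp only [List.append_assoc, List.mem_append, List.mem_singleton] at he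
                  rcases he with he | he | he
                  · exact entryInv_insert _ hpt1 (entryInv_insert _ hph (hrest e he))
                  · subst he; exact entryInv_insert _ hpt1 (entryInv_child hc hs hl hph)
                  · subst he; exact entryInv_child hc1 hs hl1 hpt1
            · rw [if_neg (show ¬ (PySem.Set.contains (PySem.Set.add seen (a2, b2)) (3 * a + 1, 3 * b + 1) = false ∧ 3 * b + 1 < 1000000) from fun hx => ht hx.1),
                if_pos (show PySem.Set.contains (PySem.Set.add seen (a2, b2)) (3 * a + 1, 3 * b + 1) = true from eq_true_of_ne_false ht)]
              have hmain := ih (rest ++ [(a2, b2, c ++ ['h'])])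
                (PySem.Set.add seen (a2, b2)) (prev.insert (a2, b2) (some ((a, b), 'h')))
                (hsync1 _) hstart1 ?_
              · simpa using hmain
              · intro e he
                rcases List.mem_append.mp he with he | he
                · exact entryInv_insert _ hph (hrest e he)
                · rw [List.mem_singleton] at he; subst he; exact entryInv_child hc hs hl hph
        · rw [if_neg hh, if_pos (show PySem.Set.contains seen (a2, b2) = true from eq_true_of_ne_false hh)]
          by_cases ht : PySem.Set.contains seen (3 * a + 1, 3 * b + 1) = false
          · have hpt : prev.contains (3 * a + 1, 3 * b + 1) = false := by rw [← hsync]; exact ht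
            rw [if_pos ⟨ht, hb3⟩, if_neg (show ¬ PySem.Set.contains seen (3 * a + 1, 3 * b + 1) = true from ne_true_of_eq_false ht)]
            by_cases hg2 : 3 * a + 1 ≥ Lout ∧ 3 * b + 1 ≤ Rout
            · rw [if_pos hg2, if_pos hg2]
              simpa using return_case hstart hc hs hl hpt
            · rw [if_neg hg2, if_neg hg2]
              have hmain := ih (rest ++ [(3 * a + 1, 3 * b + 1, c ++ ['t'])])
                (PySem.Set.add seen (3 * a + 1, 3 * b + 1))
                (prev.insert (3 * a + 1, 3 * b + 1) (some ((a, b), 't')))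
                (sync_step hsync _ _) (start_insert _ hstart hpt) ?_
              · simpa using hmain
              · intro e he
                rcases List.mem_append.mp he with he | he
                · exact entryInv_insert _ hpt (hrest e he)
                · rw [List.mem_singleton] at he; subst he; exact entryInv_child hc hs hl hpt
          · rw [if_neg (show ¬ (PySem.Set.contains seen (3 * a + 1, 3 * b + 1) = false ∧ 3 * b + 1 < 1000000) from fun hx => ht hx.1),
              if_pos (show PySem.Set.contains seen (3 * a + 1, 3 * b + 1) = true from eq_true_of_ne_false ht)]
            exact ih rest seen prev hsync hstart hrest
      · rw [if_neg hb3]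
        simp only [stepB]
        simp only [← hsync]
        by_cases hh : PySem.Set.contains seen (a2, b2) = false
        · have hph : prev.contains (a2, b2) = false := by rw [← hsync]; exact hh
          rw [if_pos hh, if_neg (show ¬ PySem.Set.contains seen (a2, b2) = true from ne_true_of_eq_false hh)]
          by_cases hg : a2 ≥ Lout ∧ b2 ≤ Rout
          · rw [if_pos hg, if_pos hg]
            simpa using return_case hstart hc hs hl hph
          · rw [if_neg hg, if_neg hg, if_neg (fun hx => hb3 hx.2)]
            have hmain := ih (rest ++ [(a2, b2, c ++ ['h'])])
              (PySem.Set.add seen (a2, b2)) (prev.insert (a2, b2) (some ((a, b), 'h')))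
              (hsync1 _) (start_insert _ hstart hph) ?_
            · simpa using hmain
            · intro e he
              rcases List.mem_append.mp he with he | he
              · exact entryInv_insert _ hph (hrest e he)
              · rw [List.mem_singleton] at he; subst he; exact entryInv_child hc hs hl hph
        · rw [if_neg hh, if_pos (show PySem.Set.contains seen (a2, b2) = true from eq_true_of_ne_false hh),
            if_neg (show ¬ (PySem.Set.contains seen (3 * a + 1, 3 * b + 1) = false ∧ 3 * b + 1 < 1000000) from fun hx => hb3 hx.2)]
          exact ih rest seen prev hsync hstart hrest

-- ===== VERDICT (by name: the statement is the Claim_ definition above) =====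
theorem solve_spec : Claim_equal_solve := by
  intro Lin Rin Lout Rout _
  unfold Spec_solve solve solve_alt
  by_cases h0 : Lin ≥ Lout ∧ Rin ≤ Rout
  · rw [if_pos h0, if_pos h0]
  · rw [if_neg h0, if_neg h0]
    apply loop_eq Lout Rout (Lin, Rin)
    · intro y
      rw [PySem.Dict.contains_insert, PySem.Dict.contains_empty]
      have hbe : (y == (Lin, Rin)) = decide (y = (Lin, Rin)) := by
        by_cases hyx : y = (Lin, Rin) <;> simp [hyx]
      simp [PySem.Set.contains, hbe]
    · simp [PySem.Dict.get?_insert_self]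
    · intro e he
      simp only [List.mem_singleton] at he
      subst he
      refine ⟨[], .nil, rfl, ?_⟩
      rw [size_insert_fresh none (by simp [PySem.Dict.contains_empty])]
      simp [PySem.Dict.size_empty]
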